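-- pv_equiv track=rewrite | github.com/danukachathurya/my-research | Chathurya/pricing_fallback.py | build_relevant_part_families
-- ===== SOURCE A (Python) =====
-- from typing import Dict, List, Optional, Set
--
-- DAMAGE_TO_PART_FAMILIES = {
--     "dent": ["Fender", "Front Bumper", "Front Door", "Rear Door", "Hood/Bonnet"],
--     "scratch": ["Front Bumper", "Fender", "Front Door", "Hood/Bonnet"],
--     "crack": ["Front Bumper", "Front Windshield"],
--     "glass shatter": ["Front Windshield"],
--     "lamp broken": ["Headlight", "Tail Light"],
--     "tire flat": ["Alloy Wheel (Single)"],
-- }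
--
-- AFFECTED_PART_FAMILY_ORDER = {
--     "headlight": ["Headlight", "Front Bumper", "Fender", "Hood/Bonnet"],
--     "tail_light": ["Tail Light", "Front Bumper", "Rear Door", "Fender"],
--     "lighting": ["Headlight", "Tail Light", "Front Bumper", "Fender"],
--     "corner_impact": [
--         "Headlight",
--         "Tail Light",
--         "Front Bumper",
--         "Fender",
--         "Front Door",
--         "Rear Door",
--         "Hood/Bonnet",
--     ],
--     "bumper": ["Front Bumper", "Fender", "Headlight", "Tail Light", "Hood/Bonnet"],
--     "body_panel": ["Fender", "Front Bumper", "Front Door", "Rear Door", "Hood/Bonnet"],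
--     "windshield": ["Front Windshield"],
--     "tire": ["Alloy Wheel (Single)"],
-- }
--
-- DEFAULT_FAMILY_ORDER = [
--     "Headlight",
--     "Front Bumper",
--     "Fender",
--     "Front Door",
--     "Rear Door",
--     "Hood/Bonnet",
--     "Tail Light",
--     "Front Windshield",
--     "Alloy Wheel (Single)",
-- ]
--
-- def normalize_damage_label(damage: str) -> str:
--     return damage.lower().replace("_", " ").strip()
--
-- def normalize_affected_part(affected_part: Optional[str]) -> str:
--     return (affected_part or "").strip().lower().replace("-", "_").replace(" ", "_")
--
-- def build_relevant_part_families(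
--     detected_damages: List[str],
--     affected_part: Optional[str] = None,
-- ) -> List[str]:
--     normalized_damages = [normalize_damage_label(damage) for damage in detected_damages]
--     normalized_damage_set = set(normalized_damages)
--     families: Set[str] = {
--         family
--         for damage in normalized_damages
--         for family in DAMAGE_TO_PART_FAMILIES.get(damage, [])
--     }
--     if not families:
--         return []
--
--     affected_key = normalize_affected_part(affected_part)
--     preferred_order = AFFECTED_PART_FAMILY_ORDER.get(affected_key, DEFAULT_FAMILY_ORDER)
--     preferred_filter = set(preferred_order)
--     if preferred_filter:
--         filtered_families = families & preferred_filter
--         if filtered_families: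
--             families = filtered_families
--
--     if "lamp broken" in normalized_damage_set:
--         if affected_key == "headlight":
--             families.discard("Tail Light")
--             families.add("Headlight")
--         elif affected_key in {"tail_light", "rear_corner"}:
--             families.discard("Headlight")
--             families.add("Tail Light")
--         elif affected_key not in {"lighting", "taillight"} and "Headlight" in families:
--             families.discard("Tail Light")
--
--     ordered = [family for family in preferred_order if family in families]
--     for family in DEFAULT_FAMILY_ORDER:
--         if family in families and family not in ordered:
--             ordered.append(family)
--
--     if affected_key == "body_panel":
--         if normalized_damage_set.issubset({"dent", "scratch"}):
--             return ordered[: min(len(ordered), 2 if len(normalized_damage_set) == 1 else 3)]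
--     if affected_key in {"bumper", "lighting", "corner_impact"}:
--         return ordered[: min(len(ordered), 4)]
--     return ordered
-- ===== SOURCE B (Python) =====
-- from typing import List, Optional
--
-- DAMAGE_TO_PART_FAMILIES = {
--     "dent": ["Fender", "Front Bumper", "Front Door", "Rear Door", "Hood/Bonnet"],
--     "scratch": ["Front Bumper", "Fender", "Front Door", "Hood/Bonnet"],
--     "crack": ["Front Bumper", "Front Windshield"],
--     "glass shatter": ["Front Windshield"],
--     "lamp broken": ["Headlight", "Tail Light"],
--     "tire flat": ["Alloy Wheel (Single)"],
-- }
--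
-- AFFECTED_PART_FAMILY_ORDER = {
--     "headlight": ["Headlight", "Front Bumper", "Fender", "Hood/Bonnet"],
--     "tail_light": ["Tail Light", "Front Bumper", "Rear Door", "Fender"],
--     "lighting": ["Headlight", "Tail Light", "Front Bumper", "Fender"],
--     "corner_impact": [
--         "Headlight",
--         "Tail Light",
--         "Front Bumper",
--         "Fender",
--         "Front Door",
--         "Rear Door",
--         "Hood/Bonnet",
--     ],
--     "bumper": ["Front Bumper", "Fender", "Headlight", "Tail Light", "Hood/Bonnet"],
--     "body_panel": ["Fender", "Front Bumper", "Front Door", "Rear Door", "Hood/Bonnet"],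
--     "windshield": ["Front Windshield"],
--     "tire": ["Alloy Wheel (Single)"],
-- }
--
-- DEFAULT_FAMILY_ORDER = [
--     "Headlight",
--     "Front Bumper",
--     "Fender",
--     "Front Door",
--     "Rear Door",
--     "Hood/Bonnet",
--     "Tail Light",
--     "Front Windshield",
--     "Alloy Wheel (Single)",
-- ]
--
-- def normalize_damage_label(damage: str) -> str:
--     return damage.lower().replace("_", " ").strip()
--
-- def normalize_affected_part(affected_part: Optional[str]) -> str:
--     return (affected_part or "").strip().lower().replace("-", "_").replace(" ", "_")
--
-- def build_relevant_part_families(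
--     detected_damages: List[str],
--     affected_part: Optional[str] = None,
-- ) -> List[str]:
--     damages = {normalize_damage_label(d) for d in detected_damages}
--     families = set()
--     for damage, fams in DAMAGE_TO_PART_FAMILIES.items():
--         if damage in damages:
--             families.update(fams)
--     if not families:
--         return []
--
--     affected_key = normalize_affected_part(affected_part)
--     preferred_order = AFFECTED_PART_FAMILY_ORDER.get(affected_key, DEFAULT_FAMILY_ORDER)
--     narrowed = families & set(preferred_order)
--     if narrowed:
--         families = narrowed
--
--     if "lamp broken" in damages:
--         if affected_key == "headlight":
--             families.discard("Tail Light")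
--             families.add("Headlight")
--         elif affected_key in {"tail_light", "rear_corner"}:
--             families.discard("Headlight")
--             families.add("Tail Light")
--         elif affected_key not in {"lighting", "taillight"} and "Headlight" in families:
--             families.discard("Tail Light")
--
--     rank = {f: 100 + i for i, f in enumerate(DEFAULT_FAMILY_ORDER)}
--     for i, f in enumerate(preferred_order):
--         rank[f] = i
--     ordered = sorted(families, key=lambda f: rank.get(f, 200))
--
--     limit = len(ordered)
--     if affected_key == "body_panel" and damages <= {"dent", "scratch"}:
--         limit = 2 if len(damages) == 1 else 3
--     elif affected_key in {"bumper", "lighting", "corner_impact"}: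
--         limit = 4
--     return ordered[:limit]
-- ===== Notes on version B (the rewrite author's own statement) =====
-- stated objective: alternative
-- what changed: B builds the family set by one pass over the damage table (instead of damage-by-damage dict lookups), orders it with a single sort under a numeric rank table encoding preferred-then-default precedence (instead of A two ordering scans), and truncates via one computed limit instead of three early-return slices.
import Mathlib
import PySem

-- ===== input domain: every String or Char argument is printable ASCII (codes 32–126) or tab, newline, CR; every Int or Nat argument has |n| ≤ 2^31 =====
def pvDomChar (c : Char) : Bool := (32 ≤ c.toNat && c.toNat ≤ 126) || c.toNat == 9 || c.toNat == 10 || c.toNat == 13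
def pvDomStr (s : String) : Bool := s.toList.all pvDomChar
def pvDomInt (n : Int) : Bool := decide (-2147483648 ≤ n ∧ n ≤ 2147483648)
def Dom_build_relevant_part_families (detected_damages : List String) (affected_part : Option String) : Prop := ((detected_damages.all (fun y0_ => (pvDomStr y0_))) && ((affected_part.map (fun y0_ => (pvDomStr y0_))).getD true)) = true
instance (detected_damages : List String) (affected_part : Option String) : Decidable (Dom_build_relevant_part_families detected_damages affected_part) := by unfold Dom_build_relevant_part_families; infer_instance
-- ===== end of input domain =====

-- B replaces A's damage-by-damage family accumulation by one pass over the damage table,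
-- and A's two-scan ordering (preferred scan + default-order append scan) by a single sort
-- under a numeric rank table; objective: alternative (same cost, different decomposition).

-- shared module-level constants (both Pythons read the same tables)
def damage_to_part_families : PySem.Dict String (List String) := PySem.Dict.ofList [
  ("dent", ["Fender", "Front Bumper", "Front Door", "Rear Door", "Hood/Bonnet"]),
  ("scratch", ["Front Bumper", "Fender", "Front Door", "Hood/Bonnet"]),
  ("crack", ["Front Bumper", "Front Windshield"]),
  ("glass shatter", ["Front Windshield"]),
  ("lamp broken", ["Headlight", "Tail Light"]),
  ("tire flat", ["Alloy Wheel (Single)"])]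

def affected_part_family_order : PySem.Dict String (List String) := PySem.Dict.ofList [
  ("headlight", ["Headlight", "Front Bumper", "Fender", "Hood/Bonnet"]),
  ("tail_light", ["Tail Light", "Front Bumper", "Rear Door", "Fender"]),
  ("lighting", ["Headlight", "Tail Light", "Front Bumper", "Fender"]),
  ("corner_impact", ["Headlight", "Tail Light", "Front Bumper", "Fender", "Front Door", "Rear Door", "Hood/Bonnet"]),
  ("bumper", ["Front Bumper", "Fender", "Headlight", "Tail Light", "Hood/Bonnet"]),
  ("body_panel", ["Fender", "Front Bumper", "Front Door", "Rear Door", "Hood/Bonnet"]),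
  ("windshield", ["Front Windshield"]),
  ("tire", ["Alloy Wheel (Single)"])]

def default_family_order : List String :=
  ["Headlight", "Front Bumper", "Fender", "Front Door", "Rear Door", "Hood/Bonnet",
   "Tail Light", "Front Windshield", "Alloy Wheel (Single)"]

-- shared module-level helpers (both Pythons call them)
def normalize_damage_label (damage : String) : String :=
  PySem.Str.strip (PySem.Str.replace (PySem.Str.lower damage) "_" " ")

def normalize_affected_part (affected_part : Option String) : String :=
  PySem.Str.replace (PySem.Str.replace (PySem.Str.lower (PySem.Str.strip (affected_part.getD ""))) "-" "_") " " "_"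

-- ===== PORT A =====
def build_relevant_part_families (detected_damages : List String) (affected_part : Option String) : List String :=
  let normalized_damages := detected_damages.map normalize_damage_label
  let normalized_damage_set : PySem.Set String := PySem.Set.ofList normalized_damages
  let families : PySem.Set String :=
    normalized_damages.foldl
      (fun s damage => PySem.Set.update s (damage_to_part_families.getD damage [])) PySem.Set.empty
  if families = [] then [] else
  let affected_key := normalize_affected_part affected_part
  let preferred_order := affected_part_family_order.getD affected_key default_family_order
  let preferred_filter : PySem.Set String := PySem.Set.ofList preferred_order
  let families :=
    if preferred_filter ≠ [] then
      let filtered_families := PySem.Set.inter families preferred_filter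
      if filtered_families ≠ [] then filtered_families else families
    else families
  let families :=
    if PySem.Set.contains normalized_damage_set "lamp broken" then
      if affected_key = "headlight" then
        PySem.Set.add (PySem.Set.discard families "Tail Light") "Headlight"
      else if affected_key = "tail_light" ∨ affected_key = "rear_corner" then
        PySem.Set.add (PySem.Set.discard families "Headlight") "Tail Light"
      else if ¬ (affected_key = "lighting" ∨ affected_key = "taillight")
              ∧ PySem.Set.contains families "Headlight" then
        PySem.Set.discard families "Tail Light"
      else families
    else families
  let ordered := preferred_order.filter (fun f => PySem.Set.contains families f)
  let ordered := default_family_order.foldl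
      (fun acc f => if PySem.Set.contains families f ∧ f ∉ acc then acc ++ [f] else acc) ordered
  if affected_key = "body_panel" ∧ PySem.Set.issubset normalized_damage_set (PySem.Set.ofList ["dent", "scratch"]) then
    PySem.List.slice ordered none
      (some (min (ordered.length : Int) (if PySem.Set.len normalized_damage_set = 1 then 2 else 3)))
  else if affected_key = "bumper" ∨ affected_key = "lighting" ∨ affected_key = "corner_impact" then
    PySem.List.slice ordered none (some (min (ordered.length : Int) 4))
  else ordered

-- ===== PORT B =====
def build_relevant_part_families_alt (detected_damages : List String) (affected_part : Option String) : List String :=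
  let damages : PySem.Set String := PySem.Set.ofList (detected_damages.map normalize_damage_label)
  let families : PySem.Set String :=
    damage_to_part_families.items.foldl
      (fun s p => if PySem.Set.contains damages p.1 then PySem.Set.update s p.2 else s) PySem.Set.empty
  if families = [] then [] else
  let affected_key := normalize_affected_part affected_part
  let preferred_order := affected_part_family_order.getD affected_key default_family_order
  let narrowed := PySem.Set.inter families (PySem.Set.ofList preferred_order)
  let families := if narrowed ≠ [] then narrowed else families
  let families :=
    if PySem.Set.contains damages "lamp broken" then
      if affected_key = "headlight" then
        PySem.Set.add (PySem.Set.discard families "Tail Light") "Headlight"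
      else if affected_key = "tail_light" ∨ affected_key = "rear_corner" then
        PySem.Set.add (PySem.Set.discard families "Headlight") "Tail Light"
      else if ¬ (affected_key = "lighting" ∨ affected_key = "taillight")
              ∧ PySem.Set.contains families "Headlight" then
        PySem.Set.discard families "Tail Light"
      else families
    else families
  let rank : PySem.Dict String Int :=
    (PySem.List.enumerate default_family_order).foldl
      (fun d p => d.insert p.2 (100 + p.1)) PySem.Dict.empty
  let rank :=
    (PySem.List.enumerate preferred_order).foldl (fun d p => d.insert p.2 p.1) rank
  let ordered := PySem.List.sorted families (fun f => rank.getD f 200)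
  let limit : Int := (ordered.length : Int)
  let limit :=
    if affected_key = "body_panel" ∧ PySem.Set.issubset damages (PySem.Set.ofList ["dent", "scratch"]) then
      (if PySem.Set.len damages = 1 then (2 : Int) else 3)
    else if affected_key = "bumper" ∨ affected_key = "lighting" ∨ affected_key = "corner_impact" then 4
    else limit
  PySem.List.slice ordered none (some limit)

-- ===== PRECONDITION & SPEC =====
def Spec_build_relevant_part_families (detected_damages : List String) (affected_part : Option String) (out : List String) : Prop := out = build_relevant_part_families_alt detected_damages affected_part
instance (detected_damages : List String) (affected_part : Option String) (out : List String) : Decidable (Spec_build_relevant_part_families detected_damages affected_part out) := by unfold Spec_build_relevant_part_families; infer_instance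

-- ===== CLAIM (what is proved, stated in full; the proofs are below) =====
def Claim_equal_build_relevant_part_families : Prop := ∀ (detected_damages : List String) (affected_part : Option String), Dom_build_relevant_part_families detected_damages affected_part → Spec_build_relevant_part_families detected_damages affected_part (build_relevant_part_families detected_damages affected_part)

-- ===== LEMMAS AND PROOFS =====

-- proof-side copies of the two tails (everything after the emptiness check), rfl-equal to the ports
def aTail (normalized_damage_set families0 : PySem.Set String) (affected_key : String) : List String :=
  let preferred_order := affected_part_family_order.getD affected_key default_family_order
  let preferred_filter : PySem.Set String := PySem.Set.ofList preferred_order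
  let families :=
    if preferred_filter ≠ [] then
      let filtered_families := PySem.Set.inter families0 preferred_filter
      if filtered_families ≠ [] then filtered_families else families0
    else families0
  let families :=
    if PySem.Set.contains normalized_damage_set "lamp broken" then
      if affected_key = "headlight" then
        PySem.Set.add (PySem.Set.discard families "Tail Light") "Headlight"
      else if affected_key = "tail_light" ∨ affected_key = "rear_corner" then
        PySem.Set.add (PySem.Set.discard families "Headlight") "Tail Light"
      else if ¬ (affected_key = "lighting" ∨ affected_key = "taillight")
              ∧ PySem.Set.contains families "Headlight" then
        PySem.Set.discard families "Tail Light"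
      else families
    else families
  let ordered := preferred_order.filter (fun f => PySem.Set.contains families f)
  let ordered := default_family_order.foldl
      (fun acc f => if PySem.Set.contains families f ∧ f ∉ acc then acc ++ [f] else acc) ordered
  if affected_key = "body_panel" ∧ PySem.Set.issubset normalized_damage_set (PySem.Set.ofList ["dent", "scratch"]) then
    PySem.List.slice ordered none
      (some (min (ordered.length : Int) (if PySem.Set.len normalized_damage_set = 1 then 2 else 3)))
  else if affected_key = "bumper" ∨ affected_key = "lighting" ∨ affected_key = "corner_impact" then
    PySem.List.slice ordered none (some (min (ordered.length : Int) 4))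
  else ordered

def bTail (damages families0 : PySem.Set String) (affected_key : String) : List String :=
  let preferred_order := affected_part_family_order.getD affected_key default_family_order
  let narrowed := PySem.Set.inter families0 (PySem.Set.ofList preferred_order)
  let families := if narrowed ≠ [] then narrowed else families0
  let families :=
    if PySem.Set.contains damages "lamp broken" then
      if affected_key = "headlight" then
        PySem.Set.add (PySem.Set.discard families "Tail Light") "Headlight"
      else if affected_key = "tail_light" ∨ affected_key = "rear_corner" then
        PySem.Set.add (PySem.Set.discard families "Headlight") "Tail Light"
      else if ¬ (affected_key = "lighting" ∨ affected_key = "taillight")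
              ∧ PySem.Set.contains families "Headlight" then
        PySem.Set.discard families "Tail Light"
      else families
    else families
  let rank : PySem.Dict String Int :=
    (PySem.List.enumerate default_family_order).foldl
      (fun d p => d.insert p.2 (100 + p.1)) PySem.Dict.empty
  let rank :=
    (PySem.List.enumerate preferred_order).foldl (fun d p => d.insert p.2 p.1) rank
  let ordered := PySem.List.sorted families (fun f => rank.getD f 200)
  let limit : Int := (ordered.length : Int)
  let limit :=
    if affected_key = "body_panel" ∧ PySem.Set.issubset damages (PySem.Set.ofList ["dent", "scratch"]) then
      (if PySem.Set.len damages = 1 then (2 : Int) else 3)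
    else if affected_key = "bumper" ∨ affected_key = "lighting" ∨ affected_key = "corner_impact" then 4
    else limit
  PySem.List.slice ordered none (some limit)

lemma a_eq_tail (dd : List String) (ap : Option String) :
    build_relevant_part_families dd ap =
      (if (dd.map normalize_damage_label).foldl
            (fun s damage => PySem.Set.update s (damage_to_part_families.getD damage [])) PySem.Set.empty = [] then []
       else aTail (PySem.Set.ofList (dd.map normalize_damage_label))
              ((dd.map normalize_damage_label).foldl
                (fun s damage => PySem.Set.update s (damage_to_part_families.getD damage [])) PySem.Set.empty)
              (normalize_affected_part ap)) := rfl

lemma b_eq_tail (dd : List String) (ap : Option String) :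
    build_relevant_part_families_alt dd ap =
      (if damage_to_part_families.items.foldl
            (fun s p => if PySem.Set.contains (PySem.Set.ofList (dd.map normalize_damage_label)) p.1
                        then PySem.Set.update s p.2 else s) PySem.Set.empty = [] then []
       else bTail (PySem.Set.ofList (dd.map normalize_damage_label))
              (damage_to_part_families.items.foldl
                (fun s p => if PySem.Set.contains (PySem.Set.ofList (dd.map normalize_damage_label)) p.1
                            then PySem.Set.update s p.2 else s) PySem.Set.empty)
              (normalize_affected_part ap)) := rfl

-- membership / nodup of the two accumulation loops
lemma mem_foldl_update (g : String → List String) (l : List String) (s : PySem.Set String) (x : String) :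
    x ∈ l.foldl (fun s d => PySem.Set.update s (g d)) s ↔ x ∈ s ∨ ∃ d ∈ l, x ∈ g d := by
  induction l generalizing s with
  | nil => simp
  | cons d l ih => simp [ih, PySem.Set.mem_update, or_assoc]

lemma mem_foldl_if_update (c : String → Bool) (l : List (String × List String))
    (s : PySem.Set String) (x : String) :
    x ∈ l.foldl (fun s p => if c p.1 then PySem.Set.update s p.2 else s) s ↔
      x ∈ s ∨ ∃ p ∈ l, c p.1 = true ∧ x ∈ p.2 := by
  induction l generalizing s with
  | nil => simp
  | cons p l ih =>
      by_cases h : c p.1 = true <;>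
        simp [h, ih, PySem.Set.mem_update, or_assoc]

lemma nodup_foldl_if_update (c : String → Bool) (l : List (String × List String))
    (s : PySem.Set String) (h : s.Nodup) :
    (l.foldl (fun s p => if c p.1 then PySem.Set.update s p.2 else s) s).Nodup := by
  induction l generalizing s with
  | nil => exact h
  | cons p l ih =>
      rw [List.foldl_cons]
      by_cases hc : c p.1 = true
      · rw [if_pos hc]; exact ih _ (PySem.Set.nodup_update _ _ h)
      · rw [if_neg hc]; exact ih _ h

-- getD on the damage table: either empty or one of the table rows
lemma getD_damage_char (d : String) :
    damage_to_part_families.getD d [] = [] ∨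
    ∃ p ∈ damage_to_part_families.items, p.1 = d ∧ damage_to_part_families.getD d [] = p.2 := by
  unfold PySem.Dict.getD PySem.Dict.get?
  cases h : List.find? (fun p => p.1 == d) damage_to_part_families.items with
  | none => left; rfl
  | some p =>
      right
      refine ⟨p, List.mem_of_find?_eq_some h, ?_, rfl⟩
      have := List.find?_some h
      simpa using this

lemma getD_of_mem_table (p : String × List String) (hp : p ∈ damage_to_part_families.items) :
    damage_to_part_families.getD p.1 [] = p.2 := by
  have : damage_to_part_families.items =
      [("dent", ["Fender", "Front Bumper", "Front Door", "Rear Door", "Hood/Bonnet"]),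
       ("scratch", ["Front Bumper", "Fender", "Front Door", "Hood/Bonnet"]),
       ("crack", ["Front Bumper", "Front Windshield"]),
       ("glass shatter", ["Front Windshield"]),
       ("lamp broken", ["Headlight", "Tail Light"]),
       ("tire flat", ["Alloy Wheel (Single)"])] := by decide
  rw [this] at hp
  simp only [List.mem_cons, List.not_mem_nil, or_false] at hp
  rcases hp with h | h | h | h | h | h <;> subst h <;> decide

-- the two family accumulations have the same members
lemma fams_mem_iff (n : List String) (x : String) :
    x ∈ n.foldl (fun s d => PySem.Set.update s (damage_to_part_families.getD d [])) PySem.Set.empty ↔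
    x ∈ damage_to_part_families.items.foldl
        (fun s p => if PySem.Set.contains (PySem.Set.ofList n) p.1 then PySem.Set.update s p.2 else s)
        PySem.Set.empty := by
  rw [mem_foldl_update, mem_foldl_if_update]
  simp only [PySem.Set.empty, List.not_mem_nil, false_or]
  constructor
  · rintro ⟨d, hd, hx⟩
    rcases getD_damage_char d with h | ⟨p, hp, hpd, hpe⟩
    · rw [h] at hx; exact absurd hx (List.not_mem_nil)
    · refine ⟨p, hp, (PySem.Set.contains_iff _ _).mpr ?_, hpe ▸ hx⟩
      rw [PySem.Set.mem_ofList, hpd]; exact hd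
  · rintro ⟨p, hp, hc, hx⟩
    refine ⟨p.1, ?_, ?_⟩
    · rw [PySem.Set.contains_iff, PySem.Set.mem_ofList] at hc; exact hc
    · rw [getD_of_mem_table p hp]; exact hx

lemma fams_sub_default (n : List String) (x : String)
    (hx : x ∈ damage_to_part_families.items.foldl
        (fun s p => if PySem.Set.contains (PySem.Set.ofList n) p.1 then PySem.Set.update s p.2 else s)
        PySem.Set.empty) : x ∈ default_family_order := by
  rw [mem_foldl_if_update] at hx
  simp only [PySem.Set.empty, List.not_mem_nil, false_or] at hx
  obtain ⟨p, hp, _, hxp⟩ := hx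
  have hall : ∀ q ∈ damage_to_part_families.items, ∀ y ∈ q.2, y ∈ default_family_order := by decide
  exact hall p hp x hxp

-- the preferred order is one of nine concrete lists
lemma P_cases (k : String) :
    affected_part_family_order.getD k default_family_order = default_family_order ∨
    ∃ p ∈ affected_part_family_order.items,
      affected_part_family_order.getD k default_family_order = p.2 := by
  unfold PySem.Dict.getD PySem.Dict.get?
  cases h : List.find? (fun p => p.1 == k) affected_part_family_order.items with
  | none => left; rfl
  | some p => right; exact ⟨p, List.mem_of_find?_eq_some h, rfl⟩

-- A's second ordering scan appends the new default-order members
lemma foldl_append_scan (c : String → Bool) (ds : List String) (acc : List String)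
    (hnd : ds.Nodup) :
    ds.foldl (fun acc f => if c f ∧ f ∉ acc then acc ++ [f] else acc) acc
      = acc ++ ds.filter (fun f => decide (c f = true ∧ f ∉ acc)) := by
  induction ds generalizing acc with
  | nil => simp
  | cons f ds ih =>
      obtain ⟨hf, hds⟩ := List.nodup_cons.mp hnd
      by_cases hc : c f = true ∧ f ∉ acc
      · rw [List.foldl_cons, if_pos hc, ih _ hds]
        rw [List.filter_cons_of_pos (by simpa using hc), List.append_assoc,
            List.singleton_append]
        congr 2
        apply List.filter_congr
        intro g hg
        have hgf : g ≠ f := fun he => hf (he ▸ hg)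
        simp [hgf]
      · rw [List.foldl_cons, if_neg hc, ih _ hds,
            List.filter_cons_of_neg (by simpa using hc)]

-- the whole tail, given member-equal family sets

-- Bool-level congruence for contains under member-equal sets
lemma contains_congr {sA sB : PySem.Set String} (hmem : ∀ x, x ∈ sA ↔ x ∈ sB) (x : String) :
    PySem.Set.contains sA x = PySem.Set.contains sB x := by
  by_cases h : x ∈ sA
  · rw [(PySem.Set.contains_iff sA x).mpr h, (PySem.Set.contains_iff sB x).mpr ((hmem x).mp h)]
  · have h2 : x ∉ sB := fun hx => h ((hmem x).mpr hx)
    have e1 : PySem.Set.contains sA x = false :=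
      Bool.not_eq_true _ |>.mp (fun hc => h ((PySem.Set.contains_iff sA x).mp hc))
    have e2 : PySem.Set.contains sB x = false :=
      Bool.not_eq_true _ |>.mp (fun hc => h2 ((PySem.Set.contains_iff sB x).mp hc))
    rw [e1, e2]

lemma nil_iff_of_mem_iff {sA sB : List String} (hmem : ∀ x, x ∈ sA ↔ x ∈ sB) :
    sA = [] ↔ sB = [] := by
  constructor <;> intro h <;> apply List.eq_nil_iff_forall_not_mem.mpr <;> intro x hx
  · exact List.eq_nil_iff_forall_not_mem.mp h x ((hmem x).mpr hx)
  · exact List.eq_nil_iff_forall_not_mem.mp h x ((hmem x).mp hx)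

-- the rank table of B, as a function of the preferred order
def rankOf (P : List String) (f : String) : Int :=
  ((PySem.List.enumerate P).foldl (fun d p => d.insert p.2 p.1)
    ((PySem.List.enumerate default_family_order).foldl
      (fun d p => d.insert p.2 (100 + p.1)) PySem.Dict.empty)).getD f 200

-- the combined precedence list: preferred first, then the remaining default-order members
def fullOrder (P : List String) : List String :=
  P ++ default_family_order.filter (fun f => !(P.contains f))

-- truncation: slicing to min(len, v) is slicing to v
lemma slice_min_eq (L : List String) (v : Int) (hv : 0 ≤ v) :
    PySem.List.slice L none (some (min (L.length : Int) v)) = PySem.List.slice L none (some v) := by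
  rw [PySem.List.slice_to L (le_min (Int.natCast_nonneg _) hv), PySem.List.slice_to L hv]
  rcases le_total (L.length : Int) v with h | h
  · rw [min_eq_left h, Int.toNat_natCast, List.take_length,
        List.take_of_length_le (by omega)]
  · rw [min_eq_right h]

lemma slice_len_eq (L : List String) :
    PySem.List.slice L none (some (L.length : Int)) = L := by
  rw [PySem.List.slice_to L (Int.natCast_nonneg _), Int.toNat_natCast, List.take_length]

-- ordering and truncation stage, with member-equal family sets
lemma stage3 (Sd s2A s2B : PySem.Set String) (k : String) (P : List String)
    (hmem2 : ∀ x, x ∈ s2A ↔ x ∈ s2B) (hnd2 : s2B.Nodup)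
    (hsub2 : ∀ x ∈ s2B, x ∈ default_family_order)
    (hFPnd : (fullOrder P).Nodup)
    (hFPsub : ∀ x ∈ default_family_order, x ∈ fullOrder P)
    (hRank : (fullOrder P).Pairwise (fun a b => rankOf P a < rankOf P b)) :
    (let ordered := P.filter (fun f => PySem.Set.contains s2A f)
     let ordered := default_family_order.foldl
        (fun acc f => if PySem.Set.contains s2A f ∧ f ∉ acc then acc ++ [f] else acc) ordered
     if k = "body_panel" ∧ PySem.Set.issubset Sd (PySem.Set.ofList ["dent", "scratch"]) then
       PySem.List.slice ordered none
         (some (min (ordered.length : Int) (if PySem.Set.len Sd = 1 then 2 else 3)))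
     else if k = "bumper" ∨ k = "lighting" ∨ k = "corner_impact" then
       PySem.List.slice ordered none (some (min (ordered.length : Int) 4))
     else ordered) =
    (let ordered := PySem.List.sorted s2B (fun f => rankOf P f)
     let limit : Int := (ordered.length : Int)
     let limit :=
       if k = "body_panel" ∧ PySem.Set.issubset Sd (PySem.Set.ofList ["dent", "scratch"]) then
         (if PySem.Set.len Sd = 1 then (2 : Int) else 3)
       else if k = "bumper" ∨ k = "lighting" ∨ k = "corner_impact" then 4
       else limit
     PySem.List.slice ordered none (some limit)) := by
  have hc : ∀ f, PySem.Set.contains s2A f = PySem.Set.contains s2B f := contains_congr hmem2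
  simp only [hc]
  set c : String → Bool := fun f => PySem.Set.contains s2B f with hcdef
  -- A's result list
  have hOA : default_family_order.foldl
      (fun acc f => if c f ∧ f ∉ acc then acc ++ [f] else acc)
      (P.filter (fun f => c f)) = (fullOrder P).filter (fun f => c f) := by
    rw [foldl_append_scan c default_family_order _ (by decide)]
    unfold fullOrder
    rw [List.filter_append, List.filter_filter]
    congr 1
    apply List.filter_congr
    intro f hf
    by_cases h1 : c f = true <;> by_cases h2 : f ∈ P <;>
      simp [h1, h2, List.mem_filter]
  -- B's result list
  have hOB : PySem.List.sorted s2B (fun f => rankOf P f) = (fullOrder P).filter (fun f => c f) := by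
    apply PySem.List.sorted_eq_of_perm_of_pairwise_lt
    · rw [List.perm_ext_iff_of_nodup (hFPnd.filter _) hnd2]
      intro a
      rw [List.mem_filter]
      constructor
      · rintro ⟨-, hca⟩
        exact (PySem.Set.contains_iff s2B a).mp hca
      · intro ha
        exact ⟨hFPsub a (hsub2 a ha), (PySem.Set.contains_iff s2B a).mpr ha⟩
    · exact List.Pairwise.sublist List.filter_sublist hRank
  rw [hOA, hOB]
  set L := (fullOrder P).filter (fun f => c f) with hL
  by_cases h1 : k = "body_panel" ∧ PySem.Set.issubset Sd (PySem.Set.ofList ["dent", "scratch"])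
  · rw [if_pos h1, if_pos h1, slice_min_eq _ _ (by split <;> norm_num)]
  · rw [if_neg h1, if_neg h1]
    by_cases h2 : k = "bumper" ∨ k = "lighting" ∨ k = "corner_impact"
    · rw [if_pos h2, if_pos h2, slice_min_eq _ _ (by norm_num)]
    · rw [if_neg h2, if_neg h2, slice_len_eq]

-- lamp-broken stage onwards
lemma stage2 (Sd s1A s1B : PySem.Set String) (k : String) (P : List String)
    (hmem1 : ∀ x, x ∈ s1A ↔ x ∈ s1B) (hnd1 : s1B.Nodup)
    (hsub1 : ∀ x ∈ s1B, x ∈ default_family_order)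
    (hFPnd : (fullOrder P).Nodup)
    (hFPsub : ∀ x ∈ default_family_order, x ∈ fullOrder P)
    (hRank : (fullOrder P).Pairwise (fun a b => rankOf P a < rankOf P b)) :
    (let families :=
      if PySem.Set.contains Sd "lamp broken" then
        if k = "headlight" then
          PySem.Set.add (PySem.Set.discard s1A "Tail Light") "Headlight"
        else if k = "tail_light" ∨ k = "rear_corner" then
          PySem.Set.add (PySem.Set.discard s1A "Headlight") "Tail Light"
        else if ¬ (k = "lighting" ∨ k = "taillight")
                ∧ PySem.Set.contains s1A "Headlight" then
          PySem.Set.discard s1A "Tail Light"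
        else s1A
      else s1A
     let ordered := P.filter (fun f => PySem.Set.contains families f)
     let ordered := default_family_order.foldl
        (fun acc f => if PySem.Set.contains families f ∧ f ∉ acc then acc ++ [f] else acc) ordered
     if k = "body_panel" ∧ PySem.Set.issubset Sd (PySem.Set.ofList ["dent", "scratch"]) then
       PySem.List.slice ordered none
         (some (min (ordered.length : Int) (if PySem.Set.len Sd = 1 then 2 else 3)))
     else if k = "bumper" ∨ k = "lighting" ∨ k = "corner_impact" then
       PySem.List.slice ordered none (some (min (ordered.length : Int) 4))
     else ordered) =
    (let families :=
      if PySem.Set.contains Sd "lamp broken" then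
        if k = "headlight" then
          PySem.Set.add (PySem.Set.discard s1B "Tail Light") "Headlight"
        else if k = "tail_light" ∨ k = "rear_corner" then
          PySem.Set.add (PySem.Set.discard s1B "Headlight") "Tail Light"
        else if ¬ (k = "lighting" ∨ k = "taillight")
                ∧ PySem.Set.contains s1B "Headlight" then
          PySem.Set.discard s1B "Tail Light"
        else s1B
      else s1B
     let ordered := PySem.List.sorted families (fun f => rankOf P f)
     let limit : Int := (ordered.length : Int)
     let limit :=
       if k = "body_panel" ∧ PySem.Set.issubset Sd (PySem.Set.ofList ["dent", "scratch"]) then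
         (if PySem.Set.len Sd = 1 then (2 : Int) else 3)
       else if k = "bumper" ∨ k = "lighting" ∨ k = "corner_impact" then 4
       else limit
     PySem.List.slice ordered none (some limit)) := by
  rw [show PySem.Set.contains s1A "Headlight" = PySem.Set.contains s1B "Headlight" from
      contains_congr hmem1 _]
  by_cases hl : PySem.Set.contains Sd "lamp broken" = true
  · simp only [if_pos hl]
    by_cases h1 : k = "headlight"
    · simp only [if_pos h1]
      refine stage3 Sd _ _ k P ?_ ?_ ?_ hFPnd hFPsub hRank
      · intro x
        simp [PySem.Set.mem_add, PySem.Set.mem_discard, hmem1 x]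
      · exact PySem.Set.nodup_add _ _ (PySem.Set.nodup_discard _ _ hnd1)
      · intro x hx
        rcases (PySem.Set.mem_add _ _ _).mp hx with h | h
        · exact hsub1 x ((PySem.Set.mem_discard _ _ _).mp h).1
        · subst h; decide
    · simp only [if_neg h1]
      by_cases h2 : k = "tail_light" ∨ k = "rear_corner"
      · simp only [if_pos h2]
        refine stage3 Sd _ _ k P ?_ ?_ ?_ hFPnd hFPsub hRank
        · intro x
          simp [PySem.Set.mem_add, PySem.Set.mem_discard, hmem1 x]
        · exact PySem.Set.nodup_add _ _ (PySem.Set.nodup_discard _ _ hnd1)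
        · intro x hx
          rcases (PySem.Set.mem_add _ _ _).mp hx with h | h
          · exact hsub1 x ((PySem.Set.mem_discard _ _ _).mp h).1
          · subst h; decide
      · simp only [if_neg h2]
        by_cases h3 : ¬ (k = "lighting" ∨ k = "taillight")
            ∧ PySem.Set.contains s1B "Headlight" = true
        · simp only [if_pos h3]
          refine stage3 Sd _ _ k P ?_ ?_ ?_ hFPnd hFPsub hRank
          · intro x
            simp [PySem.Set.mem_discard, hmem1 x]
          · exact PySem.Set.nodup_discard _ _ hnd1
          · intro x hx
            exact hsub1 x ((PySem.Set.mem_discard _ _ _).mp hx).1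
        · simp only [if_neg h3]
          exact stage3 Sd _ _ k P hmem1 hnd1 hsub1 hFPnd hFPsub hRank
  · simp only [if_neg hl]
    exact stage3 Sd _ _ k P hmem1 hnd1 hsub1 hFPnd hFPsub hRank

-- the whole tail for a fixed preferred order P
lemma tail_core (Sd sA sB : PySem.Set String) (k : String) (P : List String)
    (hmem : ∀ x, x ∈ sA ↔ x ∈ sB) (hnd : sB.Nodup)
    (hsub : ∀ x ∈ sB, x ∈ default_family_order)
    (hPne : P ≠ [])
    (hFPnd : (fullOrder P).Nodup)
    (hFPsub : ∀ x ∈ default_family_order, x ∈ fullOrder P)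
    (hRank : (fullOrder P).Pairwise (fun a b => rankOf P a < rankOf P b)) :
    (let preferred_filter : PySem.Set String := PySem.Set.ofList P
     let families :=
       if preferred_filter ≠ [] then
         let filtered_families := PySem.Set.inter sA preferred_filter
         if filtered_families ≠ [] then filtered_families else sA
       else sA
     let families :=
       if PySem.Set.contains Sd "lamp broken" then
         if k = "headlight" then
           PySem.Set.add (PySem.Set.discard families "Tail Light") "Headlight"
         else if k = "tail_light" ∨ k = "rear_corner" then
           PySem.Set.add (PySem.Set.discard families "Headlight") "Tail Light"
         else if ¬ (k = "lighting" ∨ k = "taillight")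
                 ∧ PySem.Set.contains families "Headlight" then
           PySem.Set.discard families "Tail Light"
         else families
       else families
     let ordered := P.filter (fun f => PySem.Set.contains families f)
     let ordered := default_family_order.foldl
        (fun acc f => if PySem.Set.contains families f ∧ f ∉ acc then acc ++ [f] else acc) ordered
     if k = "body_panel" ∧ PySem.Set.issubset Sd (PySem.Set.ofList ["dent", "scratch"]) then
       PySem.List.slice ordered none
         (some (min (ordered.length : Int) (if PySem.Set.len Sd = 1 then 2 else 3)))
     else if k = "bumper" ∨ k = "lighting" ∨ k = "corner_impact" then
       PySem.List.slice ordered none (some (min (ordered.length : Int) 4))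
     else ordered) =
    (let narrowed := PySem.Set.inter sB (PySem.Set.ofList P)
     let families := if narrowed ≠ [] then narrowed else sB
     let families :=
       if PySem.Set.contains Sd "lamp broken" then
         if k = "headlight" then
           PySem.Set.add (PySem.Set.discard families "Tail Light") "Headlight"
         else if k = "tail_light" ∨ k = "rear_corner" then
           PySem.Set.add (PySem.Set.discard families "Headlight") "Tail Light"
         else if ¬ (k = "lighting" ∨ k = "taillight")
                 ∧ PySem.Set.contains families "Headlight" then
           PySem.Set.discard families "Tail Light"
         else families
       else families
     let ordered := PySem.List.sorted families (fun f => rankOf P f)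
     let limit : Int := (ordered.length : Int)
     let limit :=
       if k = "body_panel" ∧ PySem.Set.issubset Sd (PySem.Set.ofList ["dent", "scratch"]) then
         (if PySem.Set.len Sd = 1 then (2 : Int) else 3)
       else if k = "bumper" ∨ k = "lighting" ∨ k = "corner_impact" then 4
       else limit
     PySem.List.slice ordered none (some limit)) := by
  have hofP : PySem.Set.ofList P ≠ [] := by
    obtain ⟨a, ha⟩ := List.exists_mem_of_ne_nil P hPne
    intro h
    have hm : a ∈ PySem.Set.ofList P := (PySem.Set.mem_ofList P a).mpr ha
    rw [h] at hm
    exact List.not_mem_nil hm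
  simp only [if_pos hofP]
  have hintmem : ∀ x, x ∈ PySem.Set.inter sA (PySem.Set.ofList P) ↔
      x ∈ PySem.Set.inter sB (PySem.Set.ofList P) := by
    intro x
    rw [PySem.Set.mem_inter, PySem.Set.mem_inter, hmem x]
  by_cases hi : PySem.Set.inter sB (PySem.Set.ofList P) = []
  · have hiA : PySem.Set.inter sA (PySem.Set.ofList P) = [] :=
      (nil_iff_of_mem_iff hintmem).mpr hi
    rw [if_neg (not_not_intro hiA), if_neg (not_not_intro hi)]
    exact stage2 Sd _ _ k P hmem hnd hsub hFPnd hFPsub hRank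
  · have hiA : PySem.Set.inter sA (PySem.Set.ofList P) ≠ [] :=
      fun h => hi ((nil_iff_of_mem_iff hintmem).mp h)
    rw [if_pos hiA, if_pos hi]
    refine stage2 Sd _ _ k P hintmem (PySem.Set.nodup_inter _ _ hnd) ?_ hFPnd hFPsub hRank
    intro x hx
    exact hsub x ((PySem.Set.mem_inter _ _ _).mp hx).1

lemma tail_eq (Sd sA sB : PySem.Set String) (k : String)
    (hmem : ∀ x, x ∈ sA ↔ x ∈ sB) (hnd : sB.Nodup)
    (hsub : ∀ x ∈ sB, x ∈ default_family_order) :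
    aTail Sd sA k = bTail Sd sB k := by
  have key : ∀ P : List String,
      (P = default_family_order ∨ ∃ p ∈ affected_part_family_order.items, P = p.2) →
      P ≠ [] ∧ (fullOrder P).Nodup ∧ (∀ x ∈ default_family_order, x ∈ fullOrder P) ∧
        (fullOrder P).Pairwise (fun a b => rankOf P a < rankOf P b) := by
    intro P hP
    have hitems : affected_part_family_order.items =
        [("headlight", ["Headlight", "Front Bumper", "Fender", "Hood/Bonnet"]),
         ("tail_light", ["Tail Light", "Front Bumper", "Rear Door", "Fender"]),
         ("lighting", ["Headlight", "Tail Light", "Front Bumper", "Fender"]),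
         ("corner_impact", ["Headlight", "Tail Light", "Front Bumper", "Fender", "Front Door", "Rear Door", "Hood/Bonnet"]),
         ("bumper", ["Front Bumper", "Fender", "Headlight", "Tail Light", "Hood/Bonnet"]),
         ("body_panel", ["Fender", "Front Bumper", "Front Door", "Rear Door", "Hood/Bonnet"]),
         ("windshield", ["Front Windshield"]),
         ("tire", ["Alloy Wheel (Single)"])] := by decide
    rcases hP with h | ⟨p, hp, h⟩
    · subst h; refine ⟨by decide, by decide, by decide, by decide⟩
    · rw [hitems] at hp
      simp only [List.mem_cons, List.not_mem_nil, or_false] at hp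
      rcases hp with e|e|e|e|e|e|e|e <;> subst e <;> simp only at h <;> subst h <;>
        exact ⟨by decide, by decide, by decide, by decide⟩
  have hPshape : affected_part_family_order.getD k default_family_order = default_family_order ∨
      ∃ p ∈ affected_part_family_order.items,
        affected_part_family_order.getD k default_family_order = p.2 := P_cases k
  obtain ⟨h1, h2, h3, h4⟩ := key _ hPshape
  exact tail_core Sd sA sB k _ hmem hnd hsub h1 h2 h3 h4

-- ===== VERDICT (by name: the statement is the Claim_ definition above) =====
theorem build_relevant_part_families_spec : Claim_equal_build_relevant_part_families := by
  intro dd ap _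
  unfold Spec_build_relevant_part_families
  rw [a_eq_tail, b_eq_tail]
  have hmem := fams_mem_iff (dd.map normalize_damage_label)
  by_cases hB : damage_to_part_families.items.foldl
      (fun s p => if PySem.Set.contains (PySem.Set.ofList (dd.map normalize_damage_label)) p.1
                  then PySem.Set.update s p.2 else s) PySem.Set.empty = []
  · rw [if_pos hB, if_pos (List.eq_nil_iff_forall_not_mem.mpr
      (fun x hx => List.eq_nil_iff_forall_not_mem.mp hB x ((hmem x).mp hx)))]
  · rw [if_neg hB, if_neg (fun hA => hB (List.eq_nil_iff_forall_not_mem.mpr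
      (fun x hx => List.eq_nil_iff_forall_not_mem.mp hA x ((hmem x).mpr hx))))]
    exact tail_eq _ _ _ _ hmem
      (nodup_foldl_if_update _ _ _ List.nodup_nil)
      (fams_sub_default (dd.map normalize_damage_label))
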